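-- pv_equiv track=rewrite | github.com/tonytang731/CIS519-Naive-Bayes | hw4-all.py | convert_document_to_feature_dictionary
-- ===== SOURCE A (Python) =====
-- def convert_document_to_feature_dictionary(doc, vocab):
--     """
--     Given a document represented as a list of tokens and the vocabulary
--     as a set of tokens, compute the count bag-of-words feature representation.
--     This function should return a dictionary which maps from the name of the
--     feature to the value of that feature.
--     """
--     # TODO
--
--
--     res = {}
--     for tokens in doc:
--         if tokens in vocab:
--             if tokens in res:
--                 res[tokens] += 1
--             else:
--                 res[tokens] = 1
--         else:
--             if '<unk>' in res:
--                 res['<unk>'] += 1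
--             else:
--                 res['<unk>'] = 1
--     return res
-- ===== SOURCE B (Python) =====
-- def convert_document_to_feature_dictionary(doc, vocab):
--     # Phase 1: full count table over all tokens, ignoring vocab.
--     c = {}
--     for t in doc:
--         c[t] = c.get(t, 0) + 1
--     # Phase 2: fold the aggregated counts into vocab buckets / '<unk>'.
--     res = {}
--     for t, n in c.items():
--         key = t if t in vocab else '<unk>'
--         res[key] = res.get(key, 0) + n
--     return res
-- ===== Notes on version B (the rewrite author's own statement) =====
-- stated objective: alternative
-- what changed: Replaces A's per-token branch-and-increment loop over the document with a two-phase decomposition: first build a full count table of all tokens (ignoring vocab), then fold the aggregated (token, count) items into the result, bucketing non-vocab counts into '<unk>'.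
import Mathlib
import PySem

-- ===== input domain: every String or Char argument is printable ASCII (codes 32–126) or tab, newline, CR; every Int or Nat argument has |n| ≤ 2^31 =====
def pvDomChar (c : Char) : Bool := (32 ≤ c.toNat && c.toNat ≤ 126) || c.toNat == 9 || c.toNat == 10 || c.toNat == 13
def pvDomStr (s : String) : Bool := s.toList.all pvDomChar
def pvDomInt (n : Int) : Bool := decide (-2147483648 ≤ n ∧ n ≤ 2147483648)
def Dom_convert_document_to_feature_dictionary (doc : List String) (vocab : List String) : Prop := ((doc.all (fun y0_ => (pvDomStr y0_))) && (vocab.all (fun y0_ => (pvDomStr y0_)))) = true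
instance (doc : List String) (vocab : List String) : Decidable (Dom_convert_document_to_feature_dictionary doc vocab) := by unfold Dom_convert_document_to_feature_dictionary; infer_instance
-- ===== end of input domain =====

-- B counts all tokens first and then partitions the aggregated counts into vocab/'<unk>' buckets
-- (a different two-phase decomposition of the same exact result; no speed claim).

-- ===== PORT A =====
def convert_document_to_feature_dictionary (doc : List String) (vocab : List String) : List (String × Int) :=
  (doc.foldl (fun res tokens =>
      if vocab.contains tokens then
        if res.contains tokens then res.insert tokens (res.getD tokens 0 + 1)
        else res.insert tokens 1
      else
        if res.contains "<unk>" then res.insert "<unk>" (res.getD "<unk>" 0 + 1)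
        else res.insert "<unk>" 1)
    (PySem.Dict.empty : PySem.Dict String Int)).items

-- ===== PORT B =====
def convert_document_to_feature_dictionary_alt (doc : List String) (vocab : List String) : List (String × Int) :=
  let c := doc.foldl (fun d t => d.insert t (d.getD t 0 + 1)) (PySem.Dict.empty : PySem.Dict String Int)
  (c.items.foldl (fun r p =>
      let key := if vocab.contains p.1 then p.1 else "<unk>"
      r.insert key (r.getD key 0 + p.2))
    (PySem.Dict.empty : PySem.Dict String Int)).items

-- ===== PRECONDITION & SPEC =====
def Spec_convert_document_to_feature_dictionary (doc : List String) (vocab : List String) (out : List (String × Int)) : Prop := out = convert_document_to_feature_dictionary_alt doc vocab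
instance (doc : List String) (vocab : List String) (out : List (String × Int)) : Decidable (Spec_convert_document_to_feature_dictionary doc vocab out) := by unfold Spec_convert_document_to_feature_dictionary; infer_instance

-- ===== CLAIM (what is proved, stated in full; the proofs are below) =====
def Claim_equal_convert_document_to_feature_dictionary : Prop := ∀ (doc : List String) (vocab : List String), Dom_convert_document_to_feature_dictionary doc vocab → Spec_convert_document_to_feature_dictionary doc vocab (convert_document_to_feature_dictionary doc vocab)

-- ===== LEMMAS AND PROOFS =====

-- the effective key map: vocab tokens stay themselves, everything else goes to "<unk>"
def pvKey (vocab : List String) (t : String) : String :=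
  if vocab.contains t then t else "<unk>"

-- A's loop body, collapsed: every branch is an insert at pvKey with the incremented count
theorem pvStepA (vocab : List String) (res : PySem.Dict String Int) (t : String) :
    (if vocab.contains t then
        if res.contains t then res.insert t (res.getD t 0 + 1)
        else res.insert t 1
      else
        if res.contains "<unk>" then res.insert "<unk>" (res.getD "<unk>" 0 + 1)
        else res.insert "<unk>" 1)
    = res.insert (pvKey vocab t) (res.getD (pvKey vocab t) 0 + 1) := by
  unfold pvKey
  by_cases hv : t ∈ vocab
  · by_cases hc : res.contains t
    · simp [hv, hc]
    · have h0 : res.getD t 0 = 0 :=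
        PySem.Dict.getD_of_not_contains res 0 (by simpa using hc)
      simp [hv, hc, h0]
  · by_cases hc : res.contains "<unk>"
    · simp [hv, hc]
    · have h0 : res.getD "<unk>" 0 = 0 :=
        PySem.Dict.getD_of_not_contains res 0 (by simpa using hc)
      simp [hv, hc, h0]

-- weighted insert loop: the value at x is the initial value plus the weights of the fiber at x
theorem pvGetD_foldl {α : Type} (key : α → String) (w : α → Int) :
    ∀ (l : List α) (d : PySem.Dict String Int) (x : String),
      (l.foldl (fun d a => d.insert (key a) (d.getD (key a) 0 + w a)) d).getD x 0
        = d.getD x 0 + ((l.filter (fun a => key a == x)).map w).sum := by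
  intro l
  induction l with
  | nil => simp
  | cons a l ih =>
    intro d x
    simp only [List.foldl_cons, List.filter_cons]
    rw [ih]
    by_cases hx : key a = x
    · subst hx
      simp [PySem.Dict.getD_insert_self]
      ring
    · rw [PySem.Dict.getD_insert_of_ne _ _ _ (Ne.symm hx)]
      simp [hx]

-- mapping a set-add through f is adding the image
theorem pvOfList_map_add (f : String → String) (s : PySem.Set String) (a : String) :
    PySem.Set.ofList ((PySem.Set.add s a).map f)
      = PySem.Set.add (PySem.Set.ofList (s.map f)) (f a) := by
  by_cases h : a ∈ s
  · have hm : f a ∈ PySem.Set.ofList (s.map f) :=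
      (PySem.Set.mem_ofList (s.map f) (f a)).mpr (List.mem_map_of_mem h)
    rw [PySem.Set.add_of_mem h, PySem.Set.add_of_mem hm]
  · rw [PySem.Set.add_of_not_mem h, List.map_append, List.map_singleton,
        PySem.Set.ofList_append_singleton]

-- dedup-then-map-then-dedup equals map-then-dedup (first-occurrence order preserved)
theorem pvOfList_map_ofList_aux (f : String → String) :
    ∀ (l : List String) (s : PySem.Set String),
      PySem.Set.ofList ((PySem.Set.update s l).map f)
        = PySem.Set.update (PySem.Set.ofList (s.map f)) (l.map f) := by
  intro l
  induction l with
  | nil => intro s; simp [PySem.Set.update_nil]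
  | cons a l ih =>
    intro s
    rw [PySem.Set.update_cons, ih, List.map_cons, PySem.Set.update_cons, pvOfList_map_add]

theorem pvOfList_map_ofList (f : String → String) (l : List String) :
    PySem.Set.ofList ((PySem.Set.ofList l).map f) = PySem.Set.ofList (l.map f) := by
  have := pvOfList_map_ofList_aux f l PySem.Set.empty
  simpa [PySem.Set.update_nil_left, PySem.Set.ofList_nil] using this

-- fiber-summed multiplicities over the distinct tokens equal the countP of the mapped list
theorem pvFiberSum (p : String → Bool) (l : List String) :
    (((PySem.Set.ofList l).filter p).map (fun u => (l.count u : Int))).sum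
      = (l.countP p : Int) := by
  have hperm : (PySem.Set.ofList l).Perm l.dedup := by
    refine (List.perm_ext_iff_of_nodup (PySem.Set.nodup_ofList _) l.nodup_dedup).mpr ?_
    intro x
    simp [PySem.Set.mem_ofList]
  have hperm2 := ((hperm.filter p).map (fun u => (l.count u : Int))).sum_eq
  rw [hperm2]
  have := List.sum_map_count_dedup_filter_eq_countP p l
  have hcast : ((l.dedup.filter p).map (fun u => (l.count u : Int))).sum
      = (((l.dedup.filter p).map (fun u => l.count u)).sum : Int) := by
    induction (l.dedup.filter p) with
    | nil => simp
    | cons b t iht => simp [iht]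
  rw [hcast, this]

-- the two ports produce identical items lists
theorem pvMain (doc vocab : List String) :
    convert_document_to_feature_dictionary doc vocab
      = convert_document_to_feature_dictionary_alt doc vocab := by
  unfold convert_document_to_feature_dictionary convert_document_to_feature_dictionary_alt
  rw [PySem.Dict.foldl_insert_getD_add_one_eq_counter]
  have hA : (List.foldl (fun res tokens =>
      if vocab.contains tokens then
        if res.contains tokens then res.insert tokens (res.getD tokens 0 + 1)
        else res.insert tokens 1
      else
        if res.contains "<unk>" then res.insert "<unk>" (res.getD "<unk>" 0 + 1)
        else res.insert "<unk>" 1) (PySem.Dict.empty : PySem.Dict String Int) doc)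
      = List.foldl (fun res t =>
          res.insert (pvKey vocab t) (res.getD (pvKey vocab t) 0 + 1)) PySem.Dict.empty doc := by
    congr 1
    funext res t
    exact pvStepA vocab res t
  rw [hA]
  show (List.foldl (fun res t =>
          res.insert (pvKey vocab t) (res.getD (pvKey vocab t) 0 + 1)) (PySem.Dict.empty : PySem.Dict String Int) doc).items
    = (List.foldl (fun r p =>
          r.insert (pvKey vocab p.1) (r.getD (pvKey vocab p.1) 0 + p.2)) (PySem.Dict.empty : PySem.Dict String Int)
        (PySem.Dict.counter doc).items).items
  set dA := List.foldl (fun res t =>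
      res.insert (pvKey vocab t) (res.getD (pvKey vocab t) 0 + 1)) (PySem.Dict.empty : PySem.Dict String Int) doc with hdA
  set dB := List.foldl (fun r p =>
      r.insert (pvKey vocab p.1) (r.getD (pvKey vocab p.1) 0 + p.2)) (PySem.Dict.empty : PySem.Dict String Int)
      (PySem.Dict.counter doc).items with hdB
  have hkA : dA.keys = PySem.Set.ofList (doc.map (pvKey vocab)) := by
    rw [hdA, PySem.Dict.keys_foldl_insert_key doc (pvKey vocab)
          (fun d t => d.getD (pvKey vocab t) 0 + 1)]
    simp [PySem.Set.update_nil_left]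
  have hkB : dB.keys = PySem.Set.ofList (doc.map (pvKey vocab)) := by
    rw [hdB, PySem.Dict.keys_foldl_insert_key (PySem.Dict.counter doc).items
          (fun p => pvKey vocab p.1) (fun r p => r.getD (pvKey vocab p.1) 0 + p.2)]
    rw [PySem.Dict.items_counter, List.map_map]
    simp only [PySem.Dict.keys_empty, PySem.Set.update_nil_left]
    exact pvOfList_map_ofList (pvKey vocab) doc
  have hnA : dA.keys.Nodup := by rw [hkA]; exact PySem.Set.nodup_ofList _
  have hnB : dB.keys.Nodup := by rw [hkB]; exact PySem.Set.nodup_ofList _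
  have hget : ∀ x : String, dA.getD x 0 = dB.getD x 0 := by
    intro x
    rw [hdA, hdB, pvGetD_foldl (pvKey vocab) (fun _ => (1 : Int)),
        pvGetD_foldl (fun p => pvKey vocab p.1) (fun p : String × Int => p.2)]
    rw [PySem.Dict.items_counter, List.filter_map, List.map_map]
    have h1 : ((doc.filter (fun t => pvKey vocab t == x)).map (fun _ => (1 : Int))).sum
        = (doc.countP (fun t => pvKey vocab t == x) : Int) := by
      rw [List.map_const', List.sum_replicate, List.countP_eq_length_filter]
      simp
    have h2 : ((PySem.Set.ofList doc).filter
          ((fun p : String × Int => pvKey vocab p.1 == x) ∘ fun k => (k, (doc.count k : Int)))).map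
          ((fun p : String × Int => p.2) ∘ fun k => (k, (doc.count k : Int)))
        = ((PySem.Set.ofList doc).filter (fun u => pvKey vocab u == x)).map
            (fun u => (doc.count u : Int)) := by
      rfl
    rw [h1, h2]
    rw [pvFiberSum (fun u => pvKey vocab u == x) doc]
  rw [PySem.Dict.items_eq_map_keys dA hnA 0, PySem.Dict.items_eq_map_keys dB hnB 0, hkA, hkB]
  apply List.map_congr_left
  intro x _
  rw [hget x]

-- ===== VERDICT (by name: the statement is the Claim_ definition above) =====
theorem convert_document_to_feature_dictionary_spec : Claim_equal_convert_document_to_feature_dictionary := by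
  intro doc vocab _
  unfold Spec_convert_document_to_feature_dictionary
  exact pvMain doc vocab
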